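-- pv_equiv track=rewrite | github.com/pts/stackmat-clock | stackmat_timer.py | get_run_packet2
-- ===== SOURCE A (Python) =====
-- def get_run_packet2(a, bb, cc):
--   assert 0 <= a <= 9
--   assert 0 <= bb <= 99
--   assert 0 <= cc <= 99
--   tss = '%d%02d%02d' % (a, bb, cc)
--   o0 = ord('0')
--   dsum = sum(ord(c) - o0 for c in tss)
--   return ' %s%c\n\r' % (tss, 64 + dsum)
-- ===== SOURCE B (Python) =====
-- def get_run_packet2(a, bb, cc):
--   assert 0 <= a <= 9
--   assert 0 <= bb <= 99
--   assert 0 <= cc <= 99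
--   digits = [a, bb // 10, bb % 10, cc // 10, cc % 10]
--   body = ''.join(chr(48 + d) for d in digits)
--   return ' ' + body + chr(64 + sum(digits)) + '\n\r'
-- ===== Notes on version B (the rewrite author's own statement) =====
-- stated objective: alternative
-- what changed: B never formats integers into a string: it computes the five digits as an integer list, renders the body by mapping chr(48+d) over that list, and takes the checksum as the list's sum, instead of A's '%d%02d%02d' formatting followed by a per-character ord-subtraction scan; Pre_ excludes inputs failing A's asserts (A raises AssertionError there).
import Mathlib
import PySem

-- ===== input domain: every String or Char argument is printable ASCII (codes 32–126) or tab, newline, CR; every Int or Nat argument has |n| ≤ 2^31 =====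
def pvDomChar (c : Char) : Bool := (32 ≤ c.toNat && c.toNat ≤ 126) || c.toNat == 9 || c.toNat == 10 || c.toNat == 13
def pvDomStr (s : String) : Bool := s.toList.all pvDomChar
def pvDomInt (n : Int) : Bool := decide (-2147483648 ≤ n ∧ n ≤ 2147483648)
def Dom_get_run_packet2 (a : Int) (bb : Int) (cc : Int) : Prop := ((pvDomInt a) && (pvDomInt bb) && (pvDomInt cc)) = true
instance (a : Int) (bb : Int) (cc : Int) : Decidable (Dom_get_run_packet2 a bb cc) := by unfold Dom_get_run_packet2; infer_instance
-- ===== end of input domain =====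

-- B builds the packet from a list of digit integers (chr per digit, sum for the checksum)
-- instead of A's printf-style formatting plus per-character ord scan (objective: alternative).

-- ===== PORT A =====
-- '%02d' % n hand-ported; exact for 0 ≤ n ≤ 99 (the range Pre_ admits)
def pvPad2 (n : Int) : String := if n < 10 then "0" ++ PySem.Int.toStr n else PySem.Int.toStr n

def get_run_packet2 (a : Int) (bb : Int) (cc : Int) : String :=
  let tss := PySem.Int.toStr a ++ pvPad2 bb ++ pvPad2 cc
  let dsum : Int := (tss.toList.map (fun c => (c.toNat : Int) - 48)).sum
  " " ++ tss ++ String.ofList [Char.ofNat (64 + dsum).toNat] ++ "\n\r"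

-- ===== PORT B =====
def get_run_packet2_alt (a : Int) (bb : Int) (cc : Int) : String :=
  let digits : List Int := [a, PySem.Int.floordiv bb 10, PySem.Int.mod bb 10,
                            PySem.Int.floordiv cc 10, PySem.Int.mod cc 10]
  let body := String.ofList (digits.map (fun d => Char.ofNat (48 + d).toNat))
  " " ++ body ++ String.ofList [Char.ofNat (64 + digits.sum).toNat] ++ "\n\r"

-- ===== PRECONDITION & SPEC =====
-- Pre_ = exactly the inputs passing A's three asserts (outside, A raises AssertionError)
def Pre_get_run_packet2 (a : Int) (bb : Int) (cc : Int) : Prop :=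
  (0 ≤ a ∧ a ≤ 9) ∧ (0 ≤ bb ∧ bb ≤ 99) ∧ (0 ≤ cc ∧ cc ≤ 99)
instance (a : Int) (bb : Int) (cc : Int) : Decidable (Pre_get_run_packet2 a bb cc) := by unfold Pre_get_run_packet2; infer_instance
def pvWitness_get_run_packet2 : Int × Int × Int := (3, 5, 47)

def Spec_get_run_packet2 (a : Int) (bb : Int) (cc : Int) (out : String) : Prop := out = get_run_packet2_alt a bb cc
instance (a : Int) (bb : Int) (cc : Int) (out : String) : Decidable (Spec_get_run_packet2 a bb cc out) := by unfold Spec_get_run_packet2; infer_instance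

-- ===== CLAIM (what is proved, stated in full; the proofs are below) =====
def Claim_equal_get_run_packet2 : Prop := ∀ (a : Int) (bb : Int) (cc : Int), Dom_get_run_packet2 a bb cc → Pre_get_run_packet2 a bb cc → Spec_get_run_packet2 a bb cc (get_run_packet2 a bb cc)

-- ===== LEMMAS AND PROOFS =====

-- A's single-digit '%d' piece equals B's chr(48+a), as strings; and its digit value is a.
theorem pv_toStr_digit (n : Int) (h0 : 0 ≤ n) (h9 : n ≤ 9) :
    PySem.Int.toStr n = String.ofList [Char.ofNat (48 + n).toNat] := by
  interval_cases n <;> decide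

-- A's '%02d' piece equals B's two chr(48+·) characters.
theorem pv_pad2_chars (n : Int) (h0 : 0 ≤ n) (h99 : n ≤ 99) :
    pvPad2 n = String.ofList [Char.ofNat (48 + PySem.Int.floordiv n 10).toNat,
                          Char.ofNat (48 + PySem.Int.mod n 10).toNat] := by
  interval_cases n <;> decide

-- A's ord-scan over a single-digit piece gives n.
theorem pv_dsum_toStr (n : Int) (h0 : 0 ≤ n) (h9 : n ≤ 9) :
    ((PySem.Int.toStr n).toList.map (fun c => (c.toNat : Int) - 48)).sum = n := by
  interval_cases n <;> decide

-- A's ord-scan over a '%02d' piece gives the two digits' sum.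
theorem pv_dsum_pad2 (n : Int) (h0 : 0 ≤ n) (h99 : n ≤ 99) :
    ((pvPad2 n).toList.map (fun c => (c.toNat : Int) - 48)).sum
      = PySem.Int.floordiv n 10 + PySem.Int.mod n 10 := by
  interval_cases n <;> decide


-- ===== VERDICT (by name: the statement is the Claim_ definition above) =====
theorem get_run_packet2_spec : Claim_equal_get_run_packet2 := by
  intro a bb cc _ hpre
  obtain ⟨⟨ha0, ha9⟩, ⟨hb0, hb99⟩, ⟨hc0, hc99⟩⟩ := hpre
  unfold Spec_get_run_packet2 get_run_packet2 get_run_packet2_alt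
  simp only [String.toList_append, List.map_append, List.sum_append,
    pv_dsum_toStr a ha0 ha9, pv_dsum_pad2 bb hb0 hb99, pv_dsum_pad2 cc hc0 hc99]
  simp only [pv_toStr_digit a ha0 ha9, pv_pad2_chars bb hb0 hb99, pv_pad2_chars cc hc0 hc99,
    ← String.ofList_append, List.cons_append, List.nil_append,
    List.map_cons, List.map_nil, List.sum_cons, List.sum_nil]
  ring_nf
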